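-- pv_equiv track=rewrite | github.com/FTDT-PyPSA/PyPSA-AR | scripts/network_500kv/08_build_pypsa_network.py | make_unique_keys
-- ===== SOURCE A (Python) =====
-- def make_unique_keys(keys):
--     """
--     Resuelve keys duplicados agregando sufijo _A, _B, _C...
--     Retorna lista de keys unicos del mismo largo.
--     """
--     from collections import Counter
--     count   = Counter()
--     seen    = Counter()
--     result  = []
--     for k in keys:
--         count[k] += 1
--     for k in keys:
--         if count[k] == 1:
--             result.append(k)
--         else:
--             suffix = chr(ord('A') + seen[k])
--             result.append(f"{k}_{suffix}")
--             seen[k] += 1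
--     return result
-- ===== SOURCE B (Python) =====
-- def make_unique_keys(keys):
--     """
--     Resuelve keys duplicados agregando sufijo _A, _B, _C...
--     Retorna lista de keys unicos del mismo largo.
--     """
--     positions = {}
--     for i, k in enumerate(keys):
--         positions.setdefault(k, []).append(i)
--     result = [None] * len(keys)
--     for k, idxs in positions.items():
--         if len(idxs) == 1:
--             result[idxs[0]] = k
--         else:
--             for j, i in enumerate(idxs):
--                 result[i] = f"{k}_{chr(ord('A') + j)}"
--     return result
-- ===== Notes on version B (the rewrite author's own statement) =====
-- stated objective: alternative
-- what changed: Instead of counting occurrences per element, B groups the indices of each key into a dict in one pass and then scatter-writes the bare key or the suffixed names into a preallocated result list, iterating over distinct keys rather than over elements.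
import Mathlib
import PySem

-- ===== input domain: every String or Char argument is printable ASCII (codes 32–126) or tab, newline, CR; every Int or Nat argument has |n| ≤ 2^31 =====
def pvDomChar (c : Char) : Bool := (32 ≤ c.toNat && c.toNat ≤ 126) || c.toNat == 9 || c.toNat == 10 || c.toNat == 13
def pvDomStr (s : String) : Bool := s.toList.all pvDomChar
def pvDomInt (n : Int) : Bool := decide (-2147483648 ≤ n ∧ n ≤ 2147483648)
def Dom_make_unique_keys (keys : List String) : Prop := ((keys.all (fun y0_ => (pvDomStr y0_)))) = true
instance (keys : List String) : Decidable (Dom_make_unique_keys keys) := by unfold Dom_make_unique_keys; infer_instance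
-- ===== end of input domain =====

-- B groups the indices of each key into a dict in one pass and then scatter-writes the bare
-- key or the suffixed names into a preallocated result, iterating over distinct keys instead
-- of counting per element (alternative algorithm, same cost).

-- ===== PORT A =====
def make_unique_keys (keys : List String) : List String :=
  let count : PySem.Dict String Int := keys.foldl (fun d k => d.modify k 0 (· + 1)) PySem.Dict.empty
  (keys.foldl (fun (st : PySem.Dict String Int × List String) k =>
      if count.getD k 0 == 1 then (st.1, st.2 ++ [k])
      else (st.1.modify k 0 (· + 1),
            st.2 ++ [k ++ "_" ++ String.ofList [Char.ofNat (('A'.toNat : Int) + st.1.getD k 0).toNat]]))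
    (PySem.Dict.empty, [])).2

-- ===== PORT B =====
-- enumerate(keys) indices are nonnegative, so List.zipIdx (Nat indices) is exact here;
-- the `[None] * len(keys)` placeholder is rendered as "" — every cell is overwritten.
def make_unique_keys_alt (keys : List String) : List String :=
  let positions : PySem.Dict String (List Nat) :=
    keys.zipIdx.foldl (fun d p => d.modify p.1 [] (fun l => l ++ [p.2])) PySem.Dict.empty
  positions.items.foldl (fun res kv =>
    if kv.2.length == 1 then res.set (kv.2.headD 0) kv.1
    else kv.2.zipIdx.foldl
      (fun r q => r.set q.1 (kv.1 ++ "_" ++ String.ofList [Char.ofNat ('A'.toNat + q.2)])) res)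
    (List.replicate keys.length "")

-- ===== PRECONDITION & SPEC =====
def Spec_make_unique_keys (keys : List String) (out : List String) : Prop := out = make_unique_keys_alt keys
instance (keys : List String) (out : List String) : Decidable (Spec_make_unique_keys keys out) := by unfold Spec_make_unique_keys; infer_instance

-- ===== CLAIM (what is proved, stated in full; the proofs are below) =====
def Claim_equal_make_unique_keys : Prop := ∀ (keys : List String), Dom_make_unique_keys keys → Spec_make_unique_keys keys (make_unique_keys keys)

-- ===== LEMMAS AND PROOFS =====

-- the common specification value at position m
def outAt (keys : List String) (m : Nat) : String :=
  if keys.count (keys.getD m "") = 1 then keys.getD m ""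
  else keys.getD m "" ++ "_" ++
    String.ofList [Char.ofNat ('A'.toNat + (keys.take m).count (keys.getD m ""))]

def target (keys : List String) : List String := (List.range keys.length).map (outAt keys)

-- ---------- A-side ----------
def mukGo (keys : List String) : List String → List String → List String
  | _,   []        => []
  | pre, k :: rest =>
      (if keys.count k = 1 then k
       else k ++ "_" ++ String.ofList [Char.ofNat ('A'.toNat + pre.count k)]) :: mukGo keys (pre ++ [k]) rest

theorem mukA_loop (keys : List String) (rest : List String) :
    ∀ (pre : List String) (seen : PySem.Dict String Int) (res : List String),
    (∀ k, keys.count k ≠ 1 → seen.getD k 0 = (pre.count k : Int)) →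
    (rest.foldl (fun (st : PySem.Dict String Int × List String) k =>
        if (PySem.Dict.counter keys).getD k 0 == 1 then (st.1, st.2 ++ [k])
        else (st.1.modify k 0 (· + 1),
              st.2 ++ [k ++ "_" ++ String.ofList [Char.ofNat (('A'.toNat : Int) + st.1.getD k 0).toNat]]))
      (seen, res)).2 = res ++ mukGo keys pre rest := by
  induction rest with
  | nil => intro pre seen res _; simp [mukGo]
  | cons k rest ih =>
    intro pre seen res hseen
    simp only [List.foldl_cons, mukGo]
    rw [PySem.Dict.getD_counter]
    by_cases h1 : keys.count k = 1
    · simp only [h1, Nat.cast_one, BEq.rfl, if_true]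
      rw [ih (pre ++ [k]) seen (res ++ [k]) ?_]
      · simp
      · intro k' hk'
        rw [hseen k' hk']
        by_cases hk : k' = k
        · exact absurd (hk ▸ h1) hk'
        · simp [List.count_append, Ne.symm hk]
    · have hb : ((keys.count k : Int) == 1) = false := by
        simp only [beq_eq_false_iff_ne, ne_eq]
        intro h; exact h1 (by exact_mod_cast h)
      simp only [hb, Bool.false_eq_true, if_false, if_neg h1]
      rw [hseen k h1]
      have htn : ((('A'.toNat : Int) + (pre.count k : Int))).toNat = 'A'.toNat + pre.count k := by
        omega
      rw [htn]
      rw [ih (pre ++ [k]) _ (res ++ [k ++ "_" ++ String.ofList [Char.ofNat ('A'.toNat + pre.count k)]]) ?_]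
      · simp
      · intro k' hk'
        rw [PySem.Dict.getD_modify]
        by_cases hk : k' = k
        · subst hk
          rw [if_pos rfl, hseen k' hk']
          simp [List.count_append]
        · rw [if_neg hk, hseen k' hk']
          simp [List.count_append, Ne.symm hk]

theorem mukGo_target (keys : List String) (rest : List String) :
    ∀ (pre : List String), keys = pre ++ rest →
    mukGo keys pre rest = (List.range rest.length).map (fun j => outAt keys (pre.length + j)) := by
  induction rest with
  | nil => intro pre _; simp [mukGo]
  | cons k rest ih =>
    intro pre hpre
    have hget : keys.getD pre.length "" = k := by
      rw [hpre]
      rw [List.getD_eq_getElem?_getD, List.getElem?_append_right (le_refl _)]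
      simp
    have htake : keys.take pre.length = pre := by rw [hpre, List.take_left]
    rw [mukGo, List.length_cons, List.range_succ_eq_map, List.map_cons, List.map_map]
    congr 1
    · simp only [outAt, hget, htake, Nat.add_zero]
    · rw [ih (pre ++ [k]) (by simpa using hpre)]
      apply List.map_congr_left
      intro j _
      simp only [Function.comp, List.length_append, List.length_singleton, Nat.succ_eq_add_one]
      congr 1
      omega

theorem A_eq_target (keys : List String) : make_unique_keys keys = target keys := by
  have hA : make_unique_keys keys =
      (keys.foldl (fun (st : PySem.Dict String Int × List String) k =>
          if (PySem.Dict.counter keys).getD k 0 == 1 then (st.1, st.2 ++ [k])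
          else (st.1.modify k 0 (· + 1),
                st.2 ++ [k ++ "_" ++ String.ofList [Char.ofNat (('A'.toNat : Int) + st.1.getD k 0).toNat]]))
        (PySem.Dict.empty, [])).2 := rfl
  rw [hA, mukA_loop keys keys [] PySem.Dict.empty [] (fun k _ => by simp [PySem.Dict.getD_empty]),
      List.nil_append, mukGo_target keys keys [] rfl]
  simp [target]

-- ---------- B-side ----------
def idxsOf (keys : List String) (k : String) : List Nat :=
  (keys.zipIdx.filter (fun p => p.1 == k)).map (·.2)

theorem idxsOf_spec (keys : List String) (k : String) :
    (idxsOf keys k).length = keys.count k ∧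
    (∀ m j, (m, j) ∈ (idxsOf keys k).zipIdx → keys[m]? = some k ∧ j = (keys.take m).count k) := by
  induction keys using List.reverseRecOn with
  | nil => simp [idxsOf]
  | append_singleton keys x ih =>
    have hidx : idxsOf (keys ++ [x]) k = idxsOf keys k ++ (if x == k then [(keys.length)] else []) := by
      simp only [idxsOf, List.zipIdx_append, List.zipIdx_singleton, List.filter_append, List.map_append]
      by_cases hx : x = k <;> simp [hx]
    constructor
    · rw [hidx]
      by_cases hx : x = k <;>
        simp [hx, List.count_append, ih.1]
    · intro m j hmj
      rw [hidx] at hmj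
      by_cases hx : x = k
      · simp only [hx, BEq.rfl, if_true] at hmj
        rw [List.zipIdx_append, List.mem_append] at hmj
        rcases hmj with hold | hnew
        · obtain ⟨hm, hj⟩ := ih.2 m j hold
          have hlt : m < keys.length := (List.getElem?_eq_some_iff.mp hm).choose
          constructor
          · rw [List.getElem?_append_left hlt]; exact hm
          · rw [List.take_append_of_le_length (le_of_lt hlt)]; exact hj
        · simp only [List.zipIdx_singleton, List.mem_singleton, Prod.mk.injEq] at hnew
          obtain ⟨hm, hj⟩ := hnew
          subst hm
          constructor
          · rw [List.getElem?_append_right (le_refl _)]; simp [hx]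
          · rw [hj, Nat.zero_add, ih.1, List.take_append_of_le_length (le_refl _)]
            simp
      · have : (x == k) = false := by simp [hx]
        simp only [this, Bool.false_eq_true, if_false, List.append_nil] at hmj
        obtain ⟨hm, hj⟩ := ih.2 m j hmj
        have hlt : m < keys.length := (List.getElem?_eq_some_iff.mp hm).choose
        constructor
        · rw [List.getElem?_append_left hlt]; exact hm
        · rw [List.take_append_of_le_length (le_of_lt hlt)]; exact hj

theorem mem_idxsOf (keys : List String) (k : String) (m : Nat) :
    m ∈ idxsOf keys k ↔ keys[m]? = some k := by
  simp only [idxsOf, List.mem_map, List.mem_filter]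
  constructor
  · rintro ⟨⟨a, i⟩, ⟨hmem, hk⟩, hi⟩
    simp only [beq_iff_eq] at hk
    subst hk; subst hi
    exact (List.mk_mem_zipIdx_iff_getElem?).mp hmem
  · intro h
    exact ⟨(k, m), ⟨(List.mk_mem_zipIdx_iff_getElem?).mpr h, by simp⟩, rfl⟩

-- scatter writes: every write to position m writes w
theorem foldSet_length {α β : Type} (pairs : List (β × Nat)) (idx : β × Nat → Nat) (v : β × Nat → α) :
    ∀ (res : List α),
    (pairs.foldl (fun r q => r.set (idx q) (v q)) res).length = res.length := by
  induction pairs with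
  | nil => intro res; rfl
  | cons q pairs ih => intro res; rw [List.foldl_cons, ih, List.length_set]

theorem foldSet_get? {α : Type} (pairs : List (Nat × Nat)) (v : Nat × Nat → α) (w : α) (m : Nat) :
    ∀ (res : List α), (∀ q ∈ pairs, q.1 = m → v q = w) → m < res.length →
    (pairs.foldl (fun r q => r.set q.1 (v q)) res)[m]? =
      if pairs.any (fun q => q.1 == m) then some w else res[m]? := by
  induction pairs with
  | nil => intro res _ _; simp
  | cons q pairs ih =>
    intro res hv hm
    rw [List.foldl_cons,
        ih (res.set q.1 (v q)) (fun q' hq' => hv q' (List.mem_cons_of_mem _ hq')) (by simpa using hm),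
        List.any_cons]
    by_cases hq : q.1 = m
    · have hval : v q = w := hv q List.mem_cons_self hq
      by_cases hany : pairs.any (fun q => q.1 == m) = true
      · simp [hany, hq]
      · simp only [Bool.not_eq_true] at hany
        simp [hany, hq, hval, hm]
    · have hfq : (q.1 == m) = false := by simp [hq]
      rw [hfq, Bool.false_or]
      by_cases hany : pairs.any (fun q => q.1 == m) = true
      · simp [hany]
      · simp only [Bool.not_eq_true] at hany
        simp [hany, hq]

-- one dict item written into the result
theorem itemWrite_get? (keys : List String) (k : String) (res : List String)
    (hlen : res.length = keys.length) (m : Nat) (hm : m < keys.length) :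
    (if (idxsOf keys k).length == 1 then res.set ((idxsOf keys k).headD 0) k
     else (idxsOf keys k).zipIdx.foldl
       (fun r q => r.set q.1 (k ++ "_" ++ String.ofList [Char.ofNat ('A'.toNat + q.2)])) res)[m]? =
    if keys[m]? = some k then some (outAt keys m) else res[m]? := by
  obtain ⟨hcnt, hpairs⟩ := idxsOf_spec keys k
  by_cases h1 : (idxsOf keys k).length = 1
  · rw [if_pos (by simpa using h1)]
    obtain ⟨m0, hm0⟩ := List.length_eq_one_iff.mp h1
    have hm0get : keys[m0]? = some k := by
      have : m0 ∈ idxsOf keys k := by rw [hm0]; exact List.mem_singleton.mpr rfl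
      exact (mem_idxsOf keys k m0).mp this
    have hout : outAt keys m0 = k := by
      have hgd : keys.getD m0 "" = k := by
        rw [List.getD_eq_getElem?_getD, hm0get]; rfl
      simp only [outAt, hgd, if_pos (h1 ▸ hcnt.symm : keys.count k = 1)]
    rw [hm0, List.headD_cons]
    rw [List.getElem?_set]
    by_cases heq : m0 = m
    · subst heq
      rw [if_pos rfl, if_pos (by omega), if_pos hm0get, hout]
    · rw [if_neg heq, if_neg ?_]
      intro hmk
      have hmem : m ∈ idxsOf keys k := (mem_idxsOf keys k m).mpr hmk
      rw [hm0] at hmem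
      exact heq (List.mem_singleton.mp hmem).symm
  · rw [if_neg (by simpa using h1)]
    have hcond : ∀ q ∈ (idxsOf keys k).zipIdx, q.1 = m →
        k ++ "_" ++ String.ofList [Char.ofNat ('A'.toNat + q.2)] = outAt keys m := by
      intro q hq hq1
      obtain ⟨hget, hj⟩ := hpairs q.1 q.2 (by simpa using hq)
      rw [hq1] at hget
      have hgd : keys.getD m "" = k := by rw [List.getD_eq_getElem?_getD, hget]; rfl
      have hcne : keys.count k ≠ 1 := by rw [← hcnt]; exact h1
      simp only [outAt, hgd, if_neg hcne, hj, hq1]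
    rw [foldSet_get? _ _ (outAt keys m) m res hcond (by omega)]
    by_cases hmk : keys[m]? = some k
    · rw [if_pos hmk, if_pos ?_]
      rw [List.any_eq_true]
      have hmem : m ∈ idxsOf keys k := (mem_idxsOf keys k m).mpr hmk
      obtain ⟨j, hj⟩ := List.mem_iff_getElem?.mp hmem
      exact ⟨(m, j), List.mk_mem_zipIdx_iff_getElem?.mpr hj, by simp⟩
    · rw [if_neg hmk, if_neg ?_]
      intro hany
      obtain ⟨q, hq, hq1⟩ := List.any_eq_true.mp hany
      have hq1' : q.1 = m := by simpa using hq1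
      exact hmk (hq1' ▸ (hpairs q.1 q.2 (by simpa using hq)).1)

theorem outer_fold (keys : List String) (D : List String) :
    ∀ (res : List String), res.length = keys.length →
    (((D.foldl (fun res k =>
        if (idxsOf keys k).length == 1 then res.set ((idxsOf keys k).headD 0) k
        else (idxsOf keys k).zipIdx.foldl
          (fun r q => r.set q.1 (k ++ "_" ++ String.ofList [Char.ofNat ('A'.toNat + q.2)])) res) res).length
        = keys.length) ∧
     ∀ m k', m < keys.length → keys[m]? = some k' →
      (D.foldl (fun res k =>
        if (idxsOf keys k).length == 1 then res.set ((idxsOf keys k).headD 0) k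
        else (idxsOf keys k).zipIdx.foldl
          (fun r q => r.set q.1 (k ++ "_" ++ String.ofList [Char.ofNat ('A'.toNat + q.2)])) res) res)[m]? =
      if k' ∈ D then some (outAt keys m) else res[m]?) := by
  induction D with
  | nil => intro res hlen; simp [hlen]
  | cons k D ih =>
    intro res hlen
    have hlen1 : (if (idxsOf keys k).length == 1 then res.set ((idxsOf keys k).headD 0) k
        else (idxsOf keys k).zipIdx.foldl
          (fun r q => r.set q.1 (k ++ "_" ++ String.ofList [Char.ofNat ('A'.toNat + q.2)])) res).length
        = keys.length := by
      split
      · rw [List.length_set]; exact hlen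
      · rw [foldSet_length]; exact hlen
    obtain ⟨ihlen, ihget⟩ := ih _ hlen1
    refine ⟨by rw [List.foldl_cons]; exact ihlen, ?_⟩
    intro m k' hm hmk
    rw [List.foldl_cons, ihget m k' hm hmk]
    rw [itemWrite_get? keys k res hlen m hm]
    by_cases hD : k' ∈ D
    · simp [hD]
    · by_cases hkk : k' = k
      · subst hkk
        simp [hD, hmk]
      · have : ¬ keys[m]? = some k := by rw [hmk]; simp [hkk]
        simp [hD, hkk, this]

theorem B_eq_target (keys : List String) : make_unique_keys_alt keys = target keys := by
  have hpos : (keys.zipIdx.foldl (fun d p => d.modify p.1 [] (fun l => l ++ [p.2]))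
      (PySem.Dict.empty : PySem.Dict String (List Nat))) =
      (keys.zipIdx.foldl (fun d p => d.modify p.1 [] (fun l => l ++ [p.2])) PySem.Dict.empty) := rfl
  set positions := keys.zipIdx.foldl (fun d p => d.modify p.1 [] (fun l => l ++ [p.2]))
      (PySem.Dict.empty : PySem.Dict String (List Nat)) with hposdef
  have hnodup : positions.keys.Nodup := by
    rw [hposdef]
    exact PySem.Dict.nodup_keys_foldl_modify_key _ _ _ _ _ PySem.Dict.nodup_keys_empty
  have hkeys : positions.keys = PySem.Set.ofList keys := by
    rw [hposdef, PySem.Dict.keys_foldl_modify_key, PySem.Dict.keys_empty,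
        PySem.Set.update_nil_left, List.zipIdx_map_fst]
  have hgetD : ∀ k, positions.getD k [] = idxsOf keys k := by
    intro k
    rw [hposdef, PySem.Dict.getD_foldl_modify_append, PySem.Dict.getD_empty, List.nil_append]
    rfl
  have hitems : positions.items = positions.keys.map (fun k => (k, idxsOf keys k)) := by
    rw [PySem.Dict.items_eq_map_keys positions hnodup []]
    exact List.map_congr_left (fun k _ => by rw [hgetD k])
  have hB : make_unique_keys_alt keys =
      positions.items.foldl (fun res kv =>
        if kv.2.length == 1 then res.set (kv.2.headD 0) kv.1
        else kv.2.zipIdx.foldl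
          (fun r q => r.set q.1 (kv.1 ++ "_" ++ String.ofList [Char.ofNat ('A'.toNat + q.2)])) res)
        (List.replicate keys.length "") := rfl
  rw [hB, hitems, List.foldl_map]
  obtain ⟨hflen, hfget⟩ := outer_fold keys positions.keys (List.replicate keys.length "")
      (List.length_replicate)
  apply List.ext_getElem?
  intro m
  by_cases hm : m < keys.length
  · have hget : keys[m]? = some keys[m] := List.getElem?_eq_getElem hm
    rw [hfget m keys[m] hm hget]
    have hmemD : keys[m] ∈ positions.keys := by
      rw [hkeys]
      exact (PySem.Set.mem_ofList _ _).mpr (List.getElem_mem hm)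
    rw [if_pos hmemD]
    rw [target, List.getElem?_map, List.getElem?_range hm]
    rfl
  · have h1 : (positions.keys.foldl (fun res k =>
        if (idxsOf keys k).length == 1 then res.set ((idxsOf keys k).headD 0) k
        else (idxsOf keys k).zipIdx.foldl
          (fun r q => r.set q.1 (k ++ "_" ++ String.ofList [Char.ofNat ('A'.toNat + q.2)])) res)
        (List.replicate keys.length ""))[m]? = none := by
      rw [List.getElem?_eq_none_iff]; omega
    have h2 : (target keys)[m]? = none := by
      rw [List.getElem?_eq_none_iff]; simp [target]; omega
    rw [h1, h2]

-- ===== VERDICT (by name: the statement is the Claim_ definition above) =====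
theorem make_unique_keys_spec : Claim_equal_make_unique_keys := by
  unfold Claim_equal_make_unique_keys
  intro keys _
  unfold Spec_make_unique_keys
  rw [A_eq_target, B_eq_target]
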